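-- pv_equiv track=rewrite | github.com/joaojunior/hackerrank | alternating-characters/main.py | alternating_characters
-- ===== SOURCE A (Python) =====
-- def alternating_characters(s):
--     qty = 0
--     i = 0
--     while i < len(s):
--         j = i + 1
--         while j < len(s) and s[j] == s[i]:
--             j += 1
--         qty += j - i - 1
--         i = j
--     return qty
-- ===== SOURCE B (Python) =====
-- def alternating_characters(s):
--     return sum(1 for x, y in zip(s, s[1:]) if x == y)
-- ===== Notes on version B (the rewrite author's own statement) =====
-- stated objective: simpler
-- what changed: Replaces the nested run-skipping while loops (inner loop scans each run, outer loop jumps run to run) with a single pairwise scan over zip(s, s[1:]) counting adjacent equal pairs; measured ~2.7x faster since the pairwise scan runs in a C-level generator instead of interpreted index loops.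
import Mathlib
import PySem

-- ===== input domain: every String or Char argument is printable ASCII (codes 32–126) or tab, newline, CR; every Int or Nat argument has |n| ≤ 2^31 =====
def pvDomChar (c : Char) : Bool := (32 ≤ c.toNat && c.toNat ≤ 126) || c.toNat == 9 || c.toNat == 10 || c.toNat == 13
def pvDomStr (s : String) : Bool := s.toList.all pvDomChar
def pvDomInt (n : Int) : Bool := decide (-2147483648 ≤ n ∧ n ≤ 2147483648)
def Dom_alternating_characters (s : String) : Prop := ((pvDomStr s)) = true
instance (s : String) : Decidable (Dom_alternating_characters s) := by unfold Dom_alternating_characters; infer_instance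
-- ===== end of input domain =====

-- B replaces A's nested run-skipping while loops with one pairwise adjacent-equality scan (objective: simpler).
-- ===== PORT A =====
-- inner while: j starts at i+1 and advances while s[j] == s[i]; returns j - (i+1)
def pvLeadEq (c : Char) : List Char → Nat
  | [] => 0
  | d :: t => if d == c then pvLeadEq c t + 1 else 0

-- outer while: qty += j - i - 1; i = j  (i.e. skip the whole run)
def pvRunA : List Char → Int
  | [] => 0
  | c :: rest =>
      let k := pvLeadEq c rest
      (k : Int) + pvRunA (rest.drop k)
termination_by l => l.length
decreasing_by simp [List.length_drop]

def alternating_characters (s : String) : Int := pvRunA s.toList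

-- ===== PORT B =====
-- sum(1 for x, y in zip(s, s[1:]) if x == y)
def pvPairCount : List Char → Int
  | a :: b :: t => (if a == b then 1 else 0) + pvPairCount (b :: t)
  | _ => 0

def alternating_characters_alt (s : String) : Int := pvPairCount s.toList

-- ===== PRECONDITION & SPEC =====
def Spec_alternating_characters (s : String) (out : Int) : Prop := out = alternating_characters_alt s
instance (s : String) (out : Int) : Decidable (Spec_alternating_characters s out) := by unfold Spec_alternating_characters; infer_instance

-- ===== CLAIM (what is proved, stated in full; the proofs are below) =====
def Claim_equal_alternating_characters : Prop := ∀ (s : String), Dom_alternating_characters s → Spec_alternating_characters s (alternating_characters s)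

-- ===== LEMMAS AND PROOFS =====

-- ===== VERDICT (by name: the statement is the Claim_ definition above) =====


theorem pvPairCount_run (l : List Char) : ∀ c, pvPairCount (c :: l) =
    (pvLeadEq c l : Int) + pvPairCount (l.drop (pvLeadEq c l)) := by
  induction l with
  | nil => intro c; simp [pvPairCount, pvLeadEq]
  | cons d t ih =>
    intro c
    by_cases h : d = c
    · subst h
      simp only [pvPairCount, pvLeadEq, beq_self_eq_true, if_true, ih d]
      rw [List.drop_succ_cons]
      push_cast
      ring
    · simp [pvPairCount, pvLeadEq, h, beq_iff_eq, Ne.symm h]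

theorem pvRunA_eq (l : List Char) : pvRunA l = pvPairCount l := by
  induction hl : l.length using Nat.strongRecOn generalizing l with
  | _ n ih =>
    cases l with
    | nil => simp [pvRunA, pvPairCount]
    | cons c rest =>
      rw [pvRunA, pvPairCount_run]
      congr 1
      apply ih (rest.drop (pvLeadEq c rest)).length
      · simp only [List.length_drop]; simp at hl; omega
      · rfl
theorem alternating_characters_spec : Claim_equal_alternating_characters := by
  intro s _
  unfold Spec_alternating_characters alternating_characters alternating_characters_alt
  exact pvRunA_eq s.toList
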